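-- pv_equiv track=rewrite | github.com/Akshat-coder2106/Tensor-Apex | business_policy_env/baseline.py | _detect_fraud
-- ===== SOURCE A (Python) =====
-- def _detect_fraud(combined_text: str, account_flags: list[str]) -> bool:
--     if any(flag in {"fraud_risk", "ato_watch", "chargeback_risk"} for flag in account_flags):
--         return True
--     signals = [
--         "fraud",
--         "chargeback",
--         "unauthorized",
--         "account takeover",
--         "stolen",
--         "card testing",
--         "multiple cards",
--         "bank reversal",
--         "skip investigation",
--         "bypass",
--         "test transactions",
--         "several new cards",
--     ]
--     return any(signal in combined_text for signal in signals)
-- ===== SOURCE B (Python) =====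
-- _FRAUD_FLAGS = frozenset({"fraud_risk", "ato_watch", "chargeback_risk"})
--
-- _SIGNALS = (
--     "fraud",
--     "chargeback",
--     "unauthorized",
--     "account takeover",
--     "stolen",
--     "card testing",
--     "multiple cards",
--     "bank reversal",
--     "skip investigation",
--     "bypass",
--     "test transactions",
--     "several new cards",
-- )
--
--
-- def _detect_fraud(combined_text: str, account_flags: list[str]) -> bool:
--     if not _FRAUD_FLAGS.isdisjoint(account_flags):
--         return True
--     # single left-to-right pass over the text: at each position, test whether
--     # some signal starts there
--     for i in range(len(combined_text)):
--         for s in _SIGNALS: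
--             if combined_text.startswith(s, i):
--                 return True
--     return False
-- ===== Notes on version B (the rewrite author's own statement) =====
-- stated objective: alternative
-- what changed: The flag guard becomes a frozenset disjointness test, and the twelve independent substring scans ('signal in combined_text' per signal) are replaced by a single left-to-right pass over the text positions that tests each position once with startswith, so the text is traversed once instead of twelve times.
import Mathlib
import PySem

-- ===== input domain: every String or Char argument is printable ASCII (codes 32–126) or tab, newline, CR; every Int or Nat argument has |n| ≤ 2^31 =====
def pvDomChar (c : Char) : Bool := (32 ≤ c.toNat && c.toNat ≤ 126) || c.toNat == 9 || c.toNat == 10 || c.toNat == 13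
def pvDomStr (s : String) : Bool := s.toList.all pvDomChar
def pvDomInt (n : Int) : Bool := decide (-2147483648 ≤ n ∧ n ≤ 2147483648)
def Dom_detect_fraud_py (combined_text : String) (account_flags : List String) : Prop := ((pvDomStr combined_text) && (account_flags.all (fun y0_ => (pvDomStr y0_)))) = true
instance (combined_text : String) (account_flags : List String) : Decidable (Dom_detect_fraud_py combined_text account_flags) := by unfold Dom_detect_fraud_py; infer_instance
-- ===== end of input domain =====

-- Header: B tests the flags by frozenset disjointness and scans the text once position-by-position with startswith, instead of A's twelve independent substring scans; objective: alternative (same cost).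
-- ===== PORT A =====
def signalsA : List String :=
  ["fraud", "chargeback", "unauthorized", "account takeover", "stolen",
   "card testing", "multiple cards", "bank reversal", "skip investigation",
   "bypass", "test transactions", "several new cards"]

def detect_fraud_py (combined_text : String) (account_flags : List String) : Bool :=
  if account_flags.any (fun flag =>
      PySem.Set.contains (PySem.Set.ofList ["fraud_risk", "ato_watch", "chargeback_risk"]) flag) then
    true
  else
    signalsA.any (fun signal => PySem.Str.isIn signal combined_text)

-- ===== PORT B =====
def fraudFlagsB : PySem.Set String := PySem.Set.ofList ["fraud_risk", "ato_watch", "chargeback_risk"]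

def signalsB : List String :=
  ["fraud", "chargeback", "unauthorized", "account takeover", "stolen",
   "card testing", "multiple cards", "bank reversal", "skip investigation",
   "bypass", "test transactions", "several new cards"]

-- the 'for i in range(len(text))' loop of Source B, one recursive step per position i
def scanSignalsB : List Char → Bool
  | [] => false
  | c :: rest =>
    (signalsB.any (fun s => PySem.Chars.startswith (c :: rest) s.toList)) || scanSignalsB rest

def detect_fraud_py_alt (combined_text : String) (account_flags : List String) : Bool :=
  -- frozenset.isdisjoint(account_flags): no element of account_flags lies in the set
  if !(account_flags.all (fun f => !(PySem.Set.contains fraudFlagsB f))) then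
    true
  else
    scanSignalsB combined_text.toList

-- ===== PRECONDITION & SPEC =====
def Spec_detect_fraud_py (combined_text : String) (account_flags : List String) (out : Bool) : Prop := out = detect_fraud_py_alt combined_text account_flags
instance (combined_text : String) (account_flags : List String) (out : Bool) : Decidable (Spec_detect_fraud_py combined_text account_flags out) := by unfold Spec_detect_fraud_py; infer_instance

-- ===== CLAIM (what is proved, stated in full; the proofs are below) =====
def Claim_equal_detect_fraud_py : Prop := ∀ (combined_text : String) (account_flags : List String), Dom_detect_fraud_py combined_text account_flags → Spec_detect_fraud_py combined_text account_flags (detect_fraud_py combined_text account_flags)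

-- ===== LEMMAS AND PROOFS =====
lemma scanSignalsB_iff (cs : List Char) :
    scanSignalsB cs = true ↔ ∃ s ∈ signalsB, s.toList <:+: cs := by
  induction cs with
  | nil =>
    simp only [scanSignalsB, List.infix_nil]
    constructor
    · intro h; exact absurd h (by decide)
    · rintro ⟨s, hs, h⟩; revert h; fin_cases hs <;> decide
  | cons c rest ih =>
    simp only [scanSignalsB, Bool.or_eq_true, List.any_eq_true,
      PySem.Chars.startswith_iff, ih, List.infix_cons_iff]
    constructor
    · rintro (⟨s, hs, h⟩ | ⟨s, hs, h⟩) <;> exact ⟨s, hs, by tauto⟩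
    · rintro ⟨s, hs, h | h⟩
      · exact Or.inl ⟨s, hs, h⟩
      · exact Or.inr ⟨s, hs, h⟩

lemma flag_guards_eq (account_flags : List String) :
    (account_flags.any (fun flag =>
        PySem.Set.contains (PySem.Set.ofList ["fraud_risk", "ato_watch", "chargeback_risk"]) flag))
      = !(account_flags.all (fun f => !(PySem.Set.contains fraudFlagsB f))) := by
  rw [List.any_eq_not_all_not]
  rfl

lemma text_scans_eq (combined_text : String) :
    (signalsA.any (fun signal => PySem.Str.isIn signal combined_text))
      = scanSignalsB combined_text.toList := by
  rcases Bool.eq_false_or_eq_true (scanSignalsB combined_text.toList) with h | h <;> rw [h]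
  · rw [scanSignalsB_iff] at h
    obtain ⟨s, hs, hin⟩ := h
    rw [List.any_eq_true]
    exact ⟨s, hs, (PySem.Str.isIn_iff_infix s combined_text).mpr hin⟩
  · rw [Bool.eq_false_iff] at h ⊢
    intro hA
    apply h
    rw [scanSignalsB_iff]
    rw [List.any_eq_true] at hA
    obtain ⟨s, hs, hin⟩ := hA
    exact ⟨s, hs, (PySem.Str.isIn_iff_infix s combined_text).mp hin⟩

-- ===== VERDICT (by name: the statement is the Claim_ definition above) =====
theorem detect_fraud_py_spec : Claim_equal_detect_fraud_py := by
  intro combined_text account_flags _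
  unfold Spec_detect_fraud_py detect_fraud_py detect_fraud_py_alt
  rw [flag_guards_eq, text_scans_eq]
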